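-- pv_equiv track=rewrite | github.com/linhdvu14/cp-sols | sols/Meta/HackerCup/2023/2023_2/A1_Ready_Go_Part_1.py | solve
-- ===== SOURCE A (Python) =====
-- def solve(R, C, grid):
--     vis = [[0] * C for _ in range(R)]
--     scores = {}
--
--     for r in range(R):
--         for c in range(C):
--             if vis[r][c] or grid[r][c] != 'W': continue
--             cnt = 0
--             st = [(r, c)]
--             vis[r][c] = 1
--             border = set()
--             while st:
--                 r1, c1 = st.pop()
--                 cnt += 1
--                 for r2, c2 in [(r1 - 1, c1), (r1 + 1, c1), (r1, c1 - 1), (r1, c1 + 1)]: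
--                     if not (0 <= r2 < R and 0 <= c2 < C): continue
--                     if vis[r2][c2] or grid[r2][c2] == 'B': continue
--                     if grid[r2][c2] == '.': border.add((r2, c2)); continue
--                     vis[r2][c2] = 1
--                     st.append((r2, c2))
--             if len(border) == 1:
--                 r, c = border.pop()
--                 scores[(r, c)] = scores.get((r, c), 0) + cnt
--
--     return 'YES' if scores else 'NO'
-- ===== SOURCE B (Python) =====
-- def solve(R, C, grid):
--     # Same answer as the stack flood-fill, but components are grown by whole-frontier
--     # set saturation (repeated neighbourhood expansion to a fixpoint) instead of an
--     # explicit stack with a visited matrix; no cell counts or score dict are kept.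
--     def neighbors(r, c):
--         return ((r - 1, c), (r + 1, c), (r, c - 1), (r, c + 1))
--
--     def whiteish(r, c):
--         return 0 <= r < R and 0 <= c < C and grid[r][c] not in 'B.'
--
--     seen = set()
--     found = False
--     for r in range(R):
--         for c in range(C):
--             if grid[r][c] != 'W' or (r, c) in seen:
--                 continue
--             comp = {(r, c)}
--             while True:
--                 grown = comp | {q for p in comp for q in neighbors(*p) if whiteish(*q)}
--                 if grown == comp:
--                     break
--                 comp = grown
--             seen |= comp
--             border = {q for p in comp for q in neighbors(*p)
--                       if 0 <= q[0] < R and 0 <= q[1] < C and grid[q[0]][q[1]] == '.'}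
--             if len(border) == 1:
--                 found = True
--     return 'YES' if found else 'NO'
-- ===== Notes on version B (the rewrite author's own statement) =====
-- stated objective: alternative
-- what changed: Replaces the explicit-stack flood fill with visited matrix, cell counter and score dict by whole-frontier set saturation: each white component is grown to a fixpoint by repeated neighbourhood expansion of a coordinate set, a seen-set replaces the 0/1 matrix, and a boolean flag replaces the scores dict.
import Mathlib
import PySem

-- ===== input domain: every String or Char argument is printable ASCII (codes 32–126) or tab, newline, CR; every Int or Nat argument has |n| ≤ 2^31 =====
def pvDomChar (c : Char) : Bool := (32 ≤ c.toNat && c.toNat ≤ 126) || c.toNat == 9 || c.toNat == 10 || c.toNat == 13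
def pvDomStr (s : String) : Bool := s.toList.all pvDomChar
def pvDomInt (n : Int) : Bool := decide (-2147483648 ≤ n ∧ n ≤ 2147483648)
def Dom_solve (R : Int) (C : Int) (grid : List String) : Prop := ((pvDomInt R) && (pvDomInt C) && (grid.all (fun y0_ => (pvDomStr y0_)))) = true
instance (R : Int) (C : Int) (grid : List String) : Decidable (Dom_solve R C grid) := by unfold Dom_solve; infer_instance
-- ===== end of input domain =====

-- B replaces the explicit-stack flood fill (visited 0/1 matrix, cell counter, score dict)
-- by whole-frontier set saturation per component with a seen-set and a boolean flag;
-- same return value, no speed claim.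

-- ===== PORT A =====
-- shared cell helpers: grid lookup and the 4-neighbour list
def gridAt (grid : List String) (r c : Int) : Option Char :=
  match PySem.List.pyGet? grid r with
  | some row => PySem.Str.pyGet? row c
  | none => none

def nbrs (r c : Int) : List (Int × Int) := [(r - 1, c), (r + 1, c), (r, c - 1), (r, c + 1)]

-- vis is Python's list-of-lists of 0/1; reads are only made in range,
-- where getD with these defaults is exact (out-of-range reads as "visited")
def visGet (vis : List (List Int)) (r c : Int) : Int :=
  (vis.getD r.toNat []).getD c.toNat 1

def visMark (vis : List (List Int)) (r c : Int) : List (List Int) :=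
  vis.set r.toNat ((vis.getD r.toNat []).set c.toNat 1)

def zeroCount (vis : List (List Int)) : Nat := (vis.map (fun row => row.count 0)).sum

-- the body of A's `for r2, c2 in [...]` neighbour loop, on state (vis, st, border)
def stepA (R C : Int) (grid : List String)
    (s : List (List Int) × List (Int × Int) × PySem.Set (Int × Int)) (p : Int × Int) :
    List (List Int) × List (Int × Int) × PySem.Set (Int × Int) :=
  if ¬(0 ≤ p.1 ∧ p.1 < R ∧ 0 ≤ p.2 ∧ p.2 < C) then s
  else if visGet s.1 p.1 p.2 ≠ 0 ∨ gridAt grid p.1 p.2 = some 'B' then s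
  else if gridAt grid p.1 p.2 = some '.' then (s.1, s.2.1, PySem.Set.add s.2.2 p)
  else (visMark s.1 p.1 p.2, p :: s.2.1, s.2.2)

-- termination helpers for the while-loop: marking a 0 cell decreases the number of 0 entries
theorem count_set_one_lt (l : List Int) (n : Nat) (h : l.getD n 1 = 0) :
    (l.set n 1).count 0 < l.count 0 := by
  induction l generalizing n with
  | nil => simp [List.getD] at h
  | cons a t ih =>
    cases n with
    | zero =>
      simp only [List.getD_cons_zero] at h
      subst h
      simp
    | succ m =>
      have := ih m (by simpa [List.getD] using h)
      simp only [List.set_cons_succ, List.count_cons]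
      omega

theorem zeroCount_set_lt (vis : List (List Int)) (n c : Nat)
    (h : (vis.getD n []).getD c 1 = 0) :
    zeroCount (vis.set n ((vis.getD n []).set c 1)) < zeroCount vis := by
  induction vis generalizing n with
  | nil => simp [List.getD] at h
  | cons row t ih =>
    cases n with
    | zero =>
      simp only [List.getD_cons_zero] at h ⊢
      simp only [List.set_cons_zero, zeroCount, List.map_cons, List.sum_cons]
      have := count_set_one_lt row c h
      omega
    | succ m =>
      simp only [List.getD_cons_succ] at h ⊢
      simp only [List.set_cons_succ, zeroCount, List.map_cons, List.sum_cons]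
      have := ih m h
      simp only [zeroCount] at this
      omega

theorem zeroCount_mark_lt (vis : List (List Int)) (r c : Int) (h : visGet vis r c = 0) :
    zeroCount (visMark vis r c) < zeroCount vis := by
  unfold visGet at h
  unfold visMark
  exact zeroCount_set_lt vis r.toNat c.toNat h

theorem stepA_measure (R C : Int) (grid : List String)
    (s : List (List Int) × List (Int × Int) × PySem.Set (Int × Int)) (p : Int × Int) :
    2 * zeroCount (stepA R C grid s p).1 + (stepA R C grid s p).2.1.length ≤
      2 * zeroCount s.1 + s.2.1.length := by
  unfold stepA
  split_ifs with h1 h2 h3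
  · exact Nat.le_refl _
  · exact Nat.le_refl _
  · rcases not_or.mp h2 with ⟨h0, -⟩
    have h0' : visGet s.1 p.1 p.2 = 0 := not_not.mp h0
    have := zeroCount_mark_lt s.1 p.1 p.2 h0'
    simp only [List.length_cons]
    omega
  · exact Nat.le_refl _

theorem foldl_stepA_measure (R C : Int) (grid : List String)
    (L : List (Int × Int)) (s : List (List Int) × List (Int × Int) × PySem.Set (Int × Int)) :
    2 * zeroCount (L.foldl (stepA R C grid) s).1 + (L.foldl (stepA R C grid) s).2.1.length ≤
      2 * zeroCount s.1 + s.2.1.length := by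
  induction L generalizing s with
  | nil => exact Nat.le_refl _
  | cons x t ih => exact Nat.le_trans (ih _) (stepA_measure R C grid s x)

-- A's `while st:` loop
def loopA (R C : Int) (grid : List String) (vis : List (List Int)) (st : List (Int × Int))
    (border : PySem.Set (Int × Int)) (cnt : Int) :
    List (List Int) × PySem.Set (Int × Int) × Int :=
  match st with
  | [] => (vis, border, cnt)
  | q :: rest =>
    let s := (nbrs q.1 q.2).foldl (stepA R C grid) (vis, rest, border)
    loopA R C grid s.1 s.2.1 s.2.2 (cnt + 1)
termination_by 2 * zeroCount vis + st.length
decreasing_by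
  have h := foldl_stepA_measure R C grid (nbrs q.1 q.2) (vis, rest, border)
  have e1 : (vis, rest, border).1 = vis := rfl
  have e2 : (vis, rest, border).2.1 = rest := rfl
  rw [e1, e2] at h
  simp only [List.length_cons]
  omega

def solve (R : Int) (C : Int) (grid : List String) : String :=
  let vis0 := (PySem.List.pyRange 0 R 1).map (fun _ => List.replicate C.toNat (0 : Int))
  let final := (PySem.List.pyRange 0 R 1).foldl (fun acc r =>
    (PySem.List.pyRange 0 C 1).foldl (fun acc c =>
      if visGet acc.1 r c ≠ 0 ∨ ¬(gridAt grid r c = some 'W') then acc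
      else
        let res := loopA R C grid (visMark acc.1 r c) [(r, c)] PySem.Set.empty 0
        if PySem.Set.len res.2.1 = 1 then
          -- border.pop() on the singleton border is its unique element
          (res.1, acc.2.insert (res.2.1.headD (0, 0)) (acc.2.getD (res.2.1.headD (0, 0)) 0 + res.2.2))
        else (res.1, acc.2)) acc)
    (vis0, (PySem.Dict.empty : PySem.Dict (Int × Int) Int))
  if final.2.size ≠ 0 then "YES" else "NO"

-- ===== PORT B =====
def whiteB (R C : Int) (grid : List String) (r c : Int) : Bool :=
  decide (0 ≤ r) && decide (r < R) && decide (0 ≤ c) && decide (c < C) &&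
    !(gridAt grid r c == some 'B') && !(gridAt grid r c == some '.')

-- one round of Source B's saturation: comp | {q for p in comp for q in neighbors(*p) if whiteish(*q)}
def growB (R C : Int) (grid : List String) (comp : PySem.Set (Int × Int)) : PySem.Set (Int × Int) :=
  PySem.Set.union comp
    (comp.flatMap (fun p => (nbrs p.1 p.2).filter (fun q => whiteB R C grid q.1 q.2)))

-- Source B's `while True: … if grown == comp: break`; fuel R*C+1 only makes the
-- fixpoint loop total (lemma satB_closed below shows the fixpoint is reached)
def satB (R C : Int) (grid : List String) (fuel : Nat) (comp : PySem.Set (Int × Int)) :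
    PySem.Set (Int × Int) :=
  match fuel with
  | 0 => comp
  | fuel + 1 =>
    let grown := growB R C grid comp
    if PySem.Set.equal grown comp then comp else satB R C grid fuel grown

def borderB (R C : Int) (grid : List String) (comp : PySem.Set (Int × Int)) :
    PySem.Set (Int × Int) :=
  PySem.Set.ofList (comp.flatMap (fun p => (nbrs p.1 p.2).filter (fun q =>
    decide (0 ≤ q.1) && decide (q.1 < R) && decide (0 ≤ q.2) && decide (q.2 < C) &&
      (gridAt grid q.1 q.2 == some '.'))))

def solve_alt (R : Int) (C : Int) (grid : List String) : String :=
  let final := (PySem.List.pyRange 0 R 1).foldl (fun acc r =>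
    (PySem.List.pyRange 0 C 1).foldl (fun acc c =>
      if ¬(gridAt grid r c = some 'W') ∨ PySem.Set.contains acc.1 (r, c) then acc
      else
        let comp := satB R C grid (R.toNat * C.toNat + 1) (PySem.Set.add PySem.Set.empty (r, c))
        (PySem.Set.union acc.1 comp,
         acc.2 || (PySem.Set.len (borderB R C grid comp) == 1))) acc)
    ((PySem.Set.empty : PySem.Set (Int × Int)), false)
  if final.2 then "YES" else "NO"

-- ===== PRECONDITION & SPEC =====
-- Pre_ excludes exactly the inputs where Python A raises IndexError: some cell of the
-- scanned R×C rectangle lies outside the given rows/row lengths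
def Pre_solve (R : Int) (C : Int) (grid : List String) : Prop :=
  C ≤ 0 ∨ (R.toNat ≤ grid.length ∧ ∀ row ∈ grid.take R.toNat, C.toNat ≤ row.toList.length)
instance (R : Int) (C : Int) (grid : List String) : Decidable (Pre_solve R C grid) := by
  unfold Pre_solve; infer_instance

def pvWitness_solve : Int × Int × List String := (2, 3, ["WW.", "B.W"])

def Spec_solve (R : Int) (C : Int) (grid : List String) (out : String) : Prop := out = solve_alt R C grid
instance (R : Int) (C : Int) (grid : List String) (out : String) : Decidable (Spec_solve R C grid out) := by unfold Spec_solve; infer_instance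

-- ===== CLAIM (what is proved, stated in full; the proofs are below) =====
def Claim_equal_solve : Prop := ∀ (R : Int) (C : Int) (grid : List String), Dom_solve R C grid → Pre_solve R C grid → Spec_solve R C grid (solve R C grid)

-- ===== LEMMAS AND PROOFS =====

-- proof-side vocabulary
def inB (R C : Int) (p : Int × Int) : Prop := 0 ≤ p.1 ∧ p.1 < R ∧ 0 ≤ p.2 ∧ p.2 < C

def whP (R C : Int) (grid : List String) (p : Int × Int) : Prop :=
  inB R C p ∧ gridAt grid p.1 p.2 ≠ some 'B' ∧ gridAt grid p.1 p.2 ≠ some '.'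

def dotP (R C : Int) (grid : List String) (e : Int × Int) : Prop :=
  inB R C e ∧ gridAt grid e.1 e.2 = some '.'

def VisP (R C : Int) (vis : List (List Int)) (p : Int × Int) : Prop :=
  inB R C p ∧ visGet vis p.1 p.2 ≠ 0

def dimsV (R C : Int) (vis : List (List Int)) : Prop :=
  vis.length = R.toNat ∧ ∀ row ∈ vis, row.length = C.toNat

def RelW (R C : Int) (grid : List String) (p q : Int × Int) : Prop :=
  q ∈ nbrs p.1 p.2 ∧ whP R C grid q

def Reach (R C : Int) (grid : List String) (s p : Int × Int) : Prop :=
  Relation.ReflTransGen (RelW R C grid) s p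

def PushC (R C : Int) (grid : List String) (vis : List (List Int)) (p : Int × Int) : Prop :=
  whP R C grid p ∧ visGet vis p.1 p.2 = 0

theorem whiteB_iff (R C : Int) (grid : List String) (p : Int × Int) :
    whiteB R C grid p.1 p.2 = true ↔ whP R C grid p := by
  simp [whiteB, whP, inB, and_assoc]

theorem nbrs_symm (p q : Int × Int) : p ∈ nbrs q.1 q.2 ↔ q ∈ nbrs p.1 p.2 := by
  rcases p with ⟨a, b⟩; rcases q with ⟨c, d⟩
  simp only [nbrs, List.mem_cons, Prod.mk.injEq, List.not_mem_nil, or_false]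
  constructor <;> (intro h; omega)

theorem nbrs_nodup (r c : Int) : (nbrs r c).Nodup := by
  simp only [nbrs]
  refine List.nodup_cons.mpr ⟨?_, List.nodup_cons.mpr ⟨?_, List.nodup_cons.mpr ⟨?_, List.nodup_singleton _⟩⟩⟩ <;>
    simp only [List.mem_cons, Prod.mk.injEq, List.not_mem_nil, or_false] <;> omega

-- reachable cells other than the start are whiteish
theorem reach_wh (R C : Int) (grid : List String) (s p : Int × Int)
    (h : Reach R C grid s p) : p = s ∨ whP R C grid p := by
  induction h with
  | refl => exact Or.inl rfl
  | tail _ hrel _ => exact Or.inr hrel.2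

-- a closed set not containing the whiteish start is disjoint from its reach set
theorem reach_disjoint (R C : Int) (grid : List String) (U : Int × Int → Prop)
    (hUcl : ∀ p, U p → ∀ q ∈ nbrs p.1 p.2, whP R C grid q → U q)
    (s : Int × Int) (hw : whP R C grid s) (hs : ¬ U s)
    (p : Int × Int) (hr : Reach R C grid s p) : ¬ U p := by
  induction hr with
  | refl => exact hs
  | @tail m p hm hrel ih =>
    intro hUp
    have hwm : whP R C grid m := by
      rcases reach_wh R C grid s m hm with h | h
      · exact h ▸ hw
      · exact h
    exact ih (hUcl p hUp m ((nbrs_symm m p).mpr hrel.1) hwm)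

-- visGet / visMark facts
theorem visGet_eq (vis : List (List Int)) (r c : Int) :
    visGet vis r c = (vis[r.toNat]?.getD [])[c.toNat]?.getD 1 := by
  simp [visGet, List.getD_eq_getElem?_getD]

theorem dims_mark (R C : Int) (vis : List (List Int)) (r c : Int) (h : dimsV R C vis) :
    dimsV R C (visMark vis r c) := by
  rcases Nat.lt_or_ge r.toNat vis.length with hlt | hge
  · refine ⟨by simp [visMark, h.1], ?_⟩
    intro row hrow
    rcases List.mem_or_eq_of_mem_set hrow with h' | h'
    · exact h.2 row h'
    · subst h'
      rw [List.length_set, List.getD_eq_getElem vis [] hlt]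
      exact h.2 _ (List.getElem_mem hlt)
  · unfold visMark
    rw [List.set_eq_of_length_le hge]
    exact h

theorem visGet_mark_self (R C : Int) (vis : List (List Int)) (r c : Int)
    (hd : dimsV R C vis) (h : inB R C (r, c)) : visGet (visMark vis r c) r c = 1 := by
  obtain ⟨h1, h2, h3, h4⟩ := h
  have hL := hd.1
  have hr : r.toNat < vis.length := by omega
  have hrow : (vis.getD r.toNat []).length = C.toNat :=
    (List.getD_eq_getElem vis [] hr) ▸ hd.2 _ (List.getElem_mem hr)
  have hc : c.toNat < (vis.getD r.toNat []).length := by omega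
  rw [visGet_eq]
  simp only [visMark]
  rw [List.getElem?_set_self hr]
  simp only [Option.getD_some]
  rw [List.getElem?_set_self hc]
  simp

theorem visGet_mark_other (vis : List (List Int)) (r c r' c' : Int)
    (h1 : 0 ≤ r) (h2 : 0 ≤ c) (h3 : 0 ≤ r') (h4 : 0 ≤ c')
    (hne : (r, c) ≠ (r', c')) : visGet (visMark vis r c) r' c' = visGet vis r' c' := by
  rw [visGet_eq, visGet_eq]
  simp only [visMark]
  by_cases hr : r.toNat = r'.toNat
  · have hrr : r = r' := by omega
    have hcc : c.toNat ≠ c'.toNat := by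
      intro hc; exact hne (by rw [hrr]; congr 1; omega)
    by_cases hin : r.toNat < vis.length
    · rw [hr] at hin
      rw [hr, List.getElem?_set_self hin]
      simp only [Option.getD_some]
      rw [List.getElem?_set_ne hcc]
      rw [List.getD_eq_getElem?_getD, ← hr]
    · rw [List.set_eq_of_length_le (by omega)]
  · rw [List.getElem?_set_ne hr]

theorem VisP_mark_iff (R C : Int) (vis : List (List Int)) (r c : Int)
    (hd : dimsV R C vis) (hin : inB R C (r, c)) (p : Int × Int) :
    VisP R C (visMark vis r c) p ↔ VisP R C vis p ∨ p = (r, c) := by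
  by_cases hp : p = (r, c)
  · subst hp
    constructor
    · intro _; exact Or.inr rfl
    · intro _; exact ⟨hin, by rw [visGet_mark_self R C vis r c hd hin]; omega⟩
  · have hne : (r, c) ≠ (p.1, p.2) := fun h => hp (by rw [h])
    constructor
    · rintro ⟨hinp, hv⟩
      rw [visGet_mark_other vis r c p.1 p.2 hin.1 hin.2.2.1 hinp.1 hinp.2.2.1 hne] at hv
      exact Or.inl ⟨hinp, hv⟩
    · rintro (⟨hinp, hv⟩ | hc)
      · refine ⟨hinp, ?_⟩
        rw [visGet_mark_other vis r c p.1 p.2 hin.1 hin.2.2.1 hinp.1 hinp.2.2.1 hne]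
        exact hv
      · exact absurd hc hp

set_option maxHeartbeats 2000000 in
theorem foldl_stepA_char (R C : Int) (grid : List String) (L : List (Int × Int)) (hnd : L.Nodup) :
    ∀ vis st bd, dimsV R C vis →
      dimsV R C ((L.foldl (stepA R C grid) (vis, st, bd)).1) ∧
      (∀ p : Int × Int, VisP R C (L.foldl (stepA R C grid) (vis, st, bd)).1 p ↔
          VisP R C vis p ∨ (p ∈ L ∧ PushC R C grid vis p)) ∧
      (∀ p : Int × Int, p ∈ (L.foldl (stepA R C grid) (vis, st, bd)).2.1 ↔
          p ∈ st ∨ (p ∈ L ∧ PushC R C grid vis p)) ∧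
      (∀ e : Int × Int, e ∈ (L.foldl (stepA R C grid) (vis, st, bd)).2.2 ↔
          e ∈ bd ∨ (e ∈ L ∧ dotP R C grid e ∧ visGet vis e.1 e.2 = 0)) ∧
      (bd.Nodup → ((L.foldl (stepA R C grid) (vis, st, bd)).2.2).Nodup) := by
  induction L with
  | nil => intro vis st bd hd; simp [hd]
  | cons n L' ih =>
    intro vis st bd hd
    have hnd' : L'.Nodup := (List.nodup_cons.mp hnd).2
    have hnmem : n ∉ L' := (List.nodup_cons.mp hnd).1
    by_cases hb : 0 ≤ n.1 ∧ n.1 < R ∧ 0 ≤ n.2 ∧ n.2 < C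
    · by_cases hg : visGet vis n.1 n.2 ≠ 0 ∨ gridAt grid n.1 n.2 = some 'B'
      · -- skip: visited or black
        have hstep : stepA R C grid (vis, st, bd) n = (vis, st, bd) := by
          simp only [stepA, if_neg (not_not_intro hb), if_pos hg]
        have hPushN : ¬ PushC R C grid vis n := by
          rintro ⟨⟨_, hB, _⟩, hv⟩
          rcases hg with hg | hg
          · exact hg hv
          · exact hB hg
        have hDotN : ¬ (dotP R C grid n ∧ visGet vis n.1 n.2 = 0) := by
          rintro ⟨⟨_, hdot⟩, hv⟩
          rcases hg with hg | hg
          · exact hg hv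
          · rw [hdot] at hg; simp at hg
        obtain ⟨ih1, ih2, ih3, ih4, ih5⟩ := ih hnd' vis st bd hd
        rw [List.foldl_cons, hstep]
        refine ⟨ih1, ?_, ?_, ?_, ih5⟩
        · intro p
          rw [ih2 p]
          simp only [List.mem_cons]
          constructor
          · rintro (h | ⟨hm, hp⟩); · tauto
            exact Or.inr ⟨Or.inr hm, hp⟩
          · rintro (h | ⟨(rfl | hm), hp⟩); · tauto
            · exact absurd hp hPushN
            · exact Or.inr ⟨hm, hp⟩
        · intro p
          rw [ih3 p]
          simp only [List.mem_cons]
          constructor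
          · rintro (h | ⟨hm, hp⟩); · tauto
            exact Or.inr ⟨Or.inr hm, hp⟩
          · rintro (h | ⟨(rfl | hm), hp⟩); · tauto
            · exact absurd hp hPushN
            · exact Or.inr ⟨hm, hp⟩
        · intro e
          rw [ih4 e]
          simp only [List.mem_cons]
          constructor
          · rintro (h | ⟨hm, hp⟩); · tauto
            exact Or.inr ⟨Or.inr hm, hp⟩
          · rintro (h | ⟨(rfl | hm), hp⟩); · tauto
            · exact absurd hp hDotN
            · exact Or.inr ⟨hm, hp⟩
      · have hg0 : visGet vis n.1 n.2 = 0 := by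
          rcases not_or.mp hg with ⟨h0, _⟩; exact not_not.mp h0
        have hgB : gridAt grid n.1 n.2 ≠ some 'B' := (not_or.mp hg).2
        by_cases hdot : gridAt grid n.1 n.2 = some '.'
        · -- dot neighbour: border gains n
          have hstep : stepA R C grid (vis, st, bd) n = (vis, st, PySem.Set.add bd n) := by
            simp only [stepA, if_neg (not_not_intro hb), if_neg hg, if_pos hdot]
          have hDotP : dotP R C grid n ∧ visGet vis n.1 n.2 = 0 := ⟨⟨hb, hdot⟩, hg0⟩
          have hPushN : ¬ PushC R C grid vis n := by
            rintro ⟨⟨_, _, hnd2⟩, _⟩; exact hnd2 hdot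
          obtain ⟨ih1, ih2, ih3, ih4, ih5⟩ := ih hnd' vis st (PySem.Set.add bd n) hd
          rw [List.foldl_cons, hstep]
          refine ⟨ih1, ?_, ?_, ?_, fun h => ih5 (PySem.Set.nodup_add bd n h)⟩
          · intro p
            rw [ih2 p]
            simp only [List.mem_cons]
            constructor
            · rintro (h | ⟨hm, hp⟩); · tauto
              exact Or.inr ⟨Or.inr hm, hp⟩
            · rintro (h | ⟨(rfl | hm), hp⟩); · tauto
              · exact absurd hp hPushN
              · exact Or.inr ⟨hm, hp⟩
          · intro p
            rw [ih3 p]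
            simp only [List.mem_cons]
            constructor
            · rintro (h | ⟨hm, hp⟩); · tauto
              exact Or.inr ⟨Or.inr hm, hp⟩
            · rintro (h | ⟨(rfl | hm), hp⟩); · tauto
              · exact absurd hp hPushN
              · exact Or.inr ⟨hm, hp⟩
          · intro e
            rw [ih4 e, PySem.Set.mem_add]
            simp only [List.mem_cons]
            constructor
            · rintro ((h | rfl) | ⟨hm, hp⟩)
              · tauto
              · exact Or.inr ⟨Or.inl rfl, hDotP.1, hDotP.2⟩
              · exact Or.inr ⟨Or.inr hm, hp⟩
            · rintro (h | ⟨(rfl | hm), hp⟩)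
              · tauto
              · tauto
              · exact Or.inr ⟨hm, hp⟩
        · -- push: mark and stack n
          have hstep : stepA R C grid (vis, st, bd) n =
              (visMark vis n.1 n.2, n :: st, bd) := by
            simp only [stepA, if_neg (not_not_intro hb), if_neg hg, if_neg hdot]
          have hPush : PushC R C grid vis n := ⟨⟨hb, hgB, hdot⟩, hg0⟩
          have hDotN : ¬ (dotP R C grid n ∧ visGet vis n.1 n.2 = 0) := by
            rintro ⟨⟨_, h⟩, _⟩; exact hdot h
          have hd' : dimsV R C (visMark vis n.1 n.2) := dims_mark R C vis n.1 n.2 hd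
          have hvm : ∀ p, VisP R C (visMark vis n.1 n.2) p ↔ VisP R C vis p ∨ p = n := by
            intro p
            have := VisP_mark_iff R C vis n.1 n.2 hd hb p
            simpa using this
          have hvg : ∀ p : Int × Int, p ≠ n → 0 ≤ p.1 → 0 ≤ p.2 →
              visGet (visMark vis n.1 n.2) p.1 p.2 = visGet vis p.1 p.2 := by
            intro p hp h1 h2
            exact visGet_mark_other vis n.1 n.2 p.1 p.2 hb.1 hb.2.2.1 h1 h2
              (by rcases p with ⟨a,b⟩; rcases n with ⟨x,y⟩; simp [Prod.ext_iff] at hp ⊢; omega)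
          have hpc : ∀ p ∈ L', (PushC R C grid (visMark vis n.1 n.2) p ↔ PushC R C grid vis p) := by
            intro p hm
            have hpn : p ≠ n := fun h => hnmem (h ▸ hm)
            constructor
            · rintro ⟨hw, hv⟩
              exact ⟨hw, by rw [hvg p hpn hw.1.1 hw.1.2.2.1] at hv; exact hv⟩
            · rintro ⟨hw, hv⟩
              exact ⟨hw, by rw [hvg p hpn hw.1.1 hw.1.2.2.1]; exact hv⟩
          obtain ⟨ih1, ih2, ih3, ih4, ih5⟩ := ih hnd' (visMark vis n.1 n.2) (n :: st) bd hd'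
          rw [List.foldl_cons, hstep]
          refine ⟨ih1, ?_, ?_, ?_, ih5⟩
          · intro p
            rw [ih2 p]
            simp only [List.mem_cons]
            constructor
            · rintro (h | ⟨hm, hp⟩)
              · rcases (hvm p).mp h with h' | rfl
                · tauto
                · exact Or.inr ⟨Or.inl rfl, hPush⟩
              · exact Or.inr ⟨Or.inr hm, ((hpc p hm).mp hp)⟩
            · rintro (h | ⟨(rfl | hm), hp⟩)
              · exact Or.inl ((hvm p).mpr (Or.inl h))
              · exact Or.inl ((hvm p).mpr (Or.inr rfl))
              · exact Or.inr ⟨hm, (hpc p hm).mpr hp⟩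
          · intro p
            rw [ih3 p]
            simp only [List.mem_cons]
            constructor
            · rintro ((rfl | h) | ⟨hm, hp⟩)
              · exact Or.inr ⟨Or.inl rfl, hPush⟩
              · tauto
              · exact Or.inr ⟨Or.inr hm, (hpc p hm).mp hp⟩
            · rintro (h | ⟨(rfl | hm), hp⟩)
              · tauto
              · tauto
              · exact Or.inr ⟨hm, (hpc p hm).mpr hp⟩
          · intro e
            rw [ih4 e]
            simp only [List.mem_cons]
            constructor
            · rintro (h | ⟨hm, hp, hv⟩)
              · tauto
              · have hen : e ≠ n := fun h' => hnmem (h' ▸ hm)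
                rw [hvg e hen hp.1.1 hp.1.2.2.1] at hv
                exact Or.inr ⟨Or.inr hm, hp, hv⟩
            · rintro (h | ⟨(rfl | hm), hp, hv⟩)
              · tauto
              · exact absurd ⟨hp, hv⟩ hDotN
              · have hen : e ≠ n := fun h' => hnmem (h' ▸ hm)
                exact Or.inr ⟨hm, hp, by rw [hvg e hen hp.1.1 hp.1.2.2.1]; exact hv⟩
    · -- out of bounds: no-op
      have hstep : stepA R C grid (vis, st, bd) n = (vis, st, bd) := by
        simp only [stepA, if_pos hb]
      have hPushN : ¬ PushC R C grid vis n := fun h => hb h.1.1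
      have hDotN : ¬ (dotP R C grid n ∧ visGet vis n.1 n.2 = 0) := fun h => hb h.1.1
      obtain ⟨ih1, ih2, ih3, ih4, ih5⟩ := ih hnd' vis st bd hd
      rw [List.foldl_cons, hstep]
      refine ⟨ih1, ?_, ?_, ?_, ih5⟩
      · intro p
        rw [ih2 p]
        simp only [List.mem_cons]
        constructor
        · rintro (h | ⟨hm, hp⟩); · tauto
          exact Or.inr ⟨Or.inr hm, hp⟩
        · rintro (h | ⟨(rfl | hm), hp⟩); · tauto
          · exact absurd hp hPushN
          · exact Or.inr ⟨hm, hp⟩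
      · intro p
        rw [ih3 p]
        simp only [List.mem_cons]
        constructor
        · rintro (h | ⟨hm, hp⟩); · tauto
          exact Or.inr ⟨Or.inr hm, hp⟩
        · rintro (h | ⟨(rfl | hm), hp⟩); · tauto
          · exact absurd hp hPushN
          · exact Or.inr ⟨hm, hp⟩
      · intro e
        rw [ih4 e]
        simp only [List.mem_cons]
        constructor
        · rintro (h | ⟨hm, hp⟩); · tauto
          exact Or.inr ⟨Or.inr hm, hp⟩
        · rintro (h | ⟨(rfl | hm), hp⟩); · tauto
          · exact absurd hp hDotN
          · exact Or.inr ⟨hm, hp⟩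

-- not-visited whiteish cells read 0 in the matrix
theorem visGet_zero_of_not_vis (R C : Int) (grid : List String) (vis : List (List Int))
    (p : Int × Int) (hw : inB R C p) (h : ¬ VisP R C vis p) : visGet vis p.1 p.2 = 0 := by
  by_contra h0
  exact h ⟨hw, h0⟩

-- the loop invariant for A's while-loop, relative to the previously
-- visited closed region U and the component start s
def InvA (R C : Int) (grid : List String) (U : Int × Int → Prop) (s : Int × Int)
    (vis : List (List Int)) (st : List (Int × Int)) (bd : PySem.Set (Int × Int)) : Prop :=
  dimsV R C vis ∧
  (∀ p ∈ st, VisP R C vis p ∧ Reach R C grid s p ∧ ¬ U p) ∧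
  (∀ p, U p → VisP R C vis p) ∧
  (∀ p, VisP R C vis p → whP R C grid p) ∧
  (∀ p, VisP R C vis p → p ∉ st → ∀ q ∈ nbrs p.1 p.2, whP R C grid q → VisP R C vis q) ∧
  (∀ e ∈ bd, dotP R C grid e ∧ ∃ p, VisP R C vis p ∧ ¬ U p ∧ e ∈ nbrs p.1 p.2) ∧
  (∀ e, dotP R C grid e → ∀ p, VisP R C vis p → ¬ U p → p ∉ st → e ∈ nbrs p.1 p.2 → e ∈ bd) ∧
  List.Nodup bd ∧
  (∀ p, VisP R C vis p → U p ∨ Reach R C grid s p)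

theorem InvA_step (R C : Int) (grid : List String) (U : Int × Int → Prop) (s : Int × Int)
    (vis : List (List Int)) (q : Int × Int) (rest : List (Int × Int)) (bd : PySem.Set (Int × Int))
    (hI : InvA R C grid U s vis (q :: rest) bd) :
    InvA R C grid U s ((nbrs q.1 q.2).foldl (stepA R C grid) (vis, rest, bd)).1
      ((nbrs q.1 q.2).foldl (stepA R C grid) (vis, rest, bd)).2.1
      ((nbrs q.1 q.2).foldl (stepA R C grid) (vis, rest, bd)).2.2 := by
  obtain ⟨i1, i2, i3, i4, i5, i6, i7, i8, i9⟩ := hI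
  obtain ⟨hqv, hqr, hqU⟩ := i2 q (List.mem_cons_self)
  obtain ⟨ch1, ch2, ch3, ch4, ch5⟩ :=
    foldl_stepA_char R C grid (nbrs q.1 q.2) (nbrs_nodup q.1 q.2) vis rest bd i1
  have hpushwh : ∀ p : Int × Int, PushC R C grid vis p → whP R C grid p := fun p hp => hp.1
  have hpushnv : ∀ p : Int × Int, PushC R C grid vis p → ¬ VisP R C vis p := by
    rintro p ⟨hw, hv⟩ ⟨_, hne⟩; exact hne hv
  refine ⟨ch1, ?_, ?_, ?_, ?_, ?_, ?_, ch5 i8, ?_⟩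
  · -- stack elements
    intro p hp
    rcases (ch3 p).mp hp with hm | ⟨hmem, hpc⟩
    · obtain ⟨h1, h2, h3⟩ := i2 p (List.mem_cons_of_mem _ hm)
      exact ⟨(ch2 p).mpr (Or.inl h1), h2, h3⟩
    · refine ⟨(ch2 p).mpr (Or.inr ⟨hmem, hpc⟩), hqr.tail ⟨hmem, hpc.1⟩, ?_⟩
      intro hU
      exact hpushnv p hpc (i3 p hU)
  · -- U stays visited
    intro p hU
    exact (ch2 p).mpr (Or.inl (i3 p hU))
  · -- visited cells are whiteish
    intro p hp
    rcases (ch2 p).mp hp with h | ⟨_, hpc⟩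
    · exact i4 p h
    · exact hpc.1
  · -- closedness off-stack
    intro p hp hnst q' hq' hwq'
    rcases (ch2 p).mp hp with hv | ⟨hmem, hpc⟩
    · by_cases hpq : p = q
      · subst hpq
        by_cases hv' : VisP R C vis q'
        · exact (ch2 q').mpr (Or.inl hv')
        · exact (ch2 q').mpr (Or.inr ⟨hq',
            ⟨hwq', visGet_zero_of_not_vis R C grid vis q' hwq'.1 hv'⟩⟩)
      · have hnst' : p ∉ q :: rest := by
          intro hmem'
          rcases List.mem_cons.mp hmem' with h | h
          · exact hpq h
          · exact hnst ((ch3 p).mpr (Or.inl h))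
        exact (ch2 q').mpr (Or.inl (i5 p hv hnst' q' hq' hwq'))
    · exact absurd ((ch3 p).mpr (Or.inr ⟨hmem, hpc⟩)) hnst
  · -- border soundness
    intro e he
    rcases (ch4 e).mp he with h | ⟨hmem, hdot, _⟩
    · obtain ⟨hd, p, h1, h2, h3⟩ := i6 e h
      exact ⟨hd, p, (ch2 p).mpr (Or.inl h1), h2, h3⟩
    · exact ⟨hdot, q, (ch2 q).mpr (Or.inl hqv), hqU, hmem⟩
  · -- border completeness
    intro e hdot p hp hU hnst hadj
    rcases (ch2 p).mp hp with hv | ⟨hmem, hpc⟩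
    · by_cases hpq : p = q
      · subst hpq
        refine (ch4 e).mpr (Or.inr ⟨hadj, hdot, ?_⟩)
        refine visGet_zero_of_not_vis R C grid vis e hdot.1 ?_
        intro hve
        exact (i4 e hve).2.2 hdot.2
      · have hnst' : p ∉ q :: rest := by
          intro hmem'
          rcases List.mem_cons.mp hmem' with h | h
          · exact hpq h
          · exact hnst ((ch3 p).mpr (Or.inl h))
        exact (ch4 e).mpr (Or.inl (i7 e hdot p hv hU hnst' hadj))
    · exact absurd ((ch3 p).mpr (Or.inr ⟨hmem, hpc⟩)) hnst
  · -- everything visited is U or reached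
    intro p hp
    rcases (ch2 p).mp hp with h | ⟨hmem, hpc⟩
    · exact i9 p h
    · exact Or.inr (hqr.tail ⟨hmem, hpc.1⟩)

theorem loopA_master (R C : Int) (grid : List String) (U : Int × Int → Prop) (s : Int × Int) :
    ∀ (vis : List (List Int)) (st : List (Int × Int)) (bd : PySem.Set (Int × Int)) (cnt : Int),
      InvA R C grid U s vis st bd →
      dimsV R C (loopA R C grid vis st bd cnt).1 ∧
      (∀ p, VisP R C vis p → VisP R C (loopA R C grid vis st bd cnt).1 p) ∧
      (∀ p, VisP R C (loopA R C grid vis st bd cnt).1 p → U p ∨ Reach R C grid s p) ∧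
      (∀ p, U p → VisP R C (loopA R C grid vis st bd cnt).1 p) ∧
      (∀ p, VisP R C (loopA R C grid vis st bd cnt).1 p →
        ∀ q ∈ nbrs p.1 p.2, whP R C grid q → VisP R C (loopA R C grid vis st bd cnt).1 q) ∧
      (∀ e ∈ (loopA R C grid vis st bd cnt).2.1, dotP R C grid e ∧
        ∃ p, VisP R C (loopA R C grid vis st bd cnt).1 p ∧ ¬ U p ∧ e ∈ nbrs p.1 p.2) ∧
      (∀ e, dotP R C grid e → ∀ p, VisP R C (loopA R C grid vis st bd cnt).1 p → ¬ U p →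
        e ∈ nbrs p.1 p.2 → e ∈ (loopA R C grid vis st bd cnt).2.1) ∧
      List.Nodup ((loopA R C grid vis st bd cnt).2.1) := by
  intro vis st bd cnt
  induction vis, st, bd, cnt using loopA.induct R C grid with
  | case1 vis bd cnt =>
    intro hI
    obtain ⟨i1, i2, i3, i4, i5, i6, i7, i8, i9⟩ := hI
    rw [loopA]
    exact ⟨i1, fun p h => h, i9, i3,
      fun p hp q hq hw => i5 p hp (List.not_mem_nil) q hq hw,
      i6, fun e hd p hp hU hadj => i7 e hd p hp hU (List.not_mem_nil) hadj, i8⟩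
  | case2 vis bd cnt q rest fs ih =>
    intro hI
    have hI' := InvA_step R C grid U s vis q rest bd hI
    obtain ⟨m1, m2, m3, m4, m5, m6, m7, m8⟩ := ih hI'
    have mono : ∀ p, VisP R C vis p →
        VisP R C ((nbrs q.1 q.2).foldl (stepA R C grid) (vis, rest, bd)).1 p := by
      intro p h
      obtain ⟨-, ch2, -, -, -⟩ :=
        foldl_stepA_char R C grid (nbrs q.1 q.2) (nbrs_nodup q.1 q.2) vis rest bd hI.1
      exact (ch2 p).mpr (Or.inl h)
    rw [loopA]
    exact ⟨m1, fun p hp => m2 p (mono p hp), m3, m4, m5, m6, m7, m8⟩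

-- ---- B-side: saturation computes exactly the reach set ----

theorem mem_growB (R C : Int) (grid : List String) (comp : PySem.Set (Int × Int)) (x : Int × Int) :
    x ∈ growB R C grid comp ↔
      x ∈ comp ∨ ∃ p ∈ comp, x ∈ nbrs p.1 p.2 ∧ whP R C grid x := by
  unfold growB
  rw [PySem.Set.mem_union]
  simp only [List.mem_flatMap, List.mem_filter]
  constructor
  · rintro (h | ⟨p, hp, hx, hw⟩)
    · exact Or.inl h
    · exact Or.inr ⟨p, hp, hx, (whiteB_iff R C grid x).mp hw⟩
  · rintro (h | ⟨p, hp, hx, hw⟩)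
    · exact Or.inl h
    · exact Or.inr ⟨p, hp, hx, (whiteB_iff R C grid x).mpr hw⟩

theorem nodup_growB (R C : Int) (grid : List String) (comp : PySem.Set (Int × Int))
    (h : comp.Nodup) : (growB R C grid comp).Nodup := PySem.Set.nodup_union _ _ h

theorem satB_mono (R C : Int) (grid : List String) :
    ∀ (fuel : Nat) (comp : PySem.Set (Int × Int)) (x : Int × Int),
      x ∈ comp → x ∈ satB R C grid fuel comp := by
  intro fuel
  induction fuel with
  | zero => intro comp x hx; simpa [satB] using hx
  | succ n ih =>
    intro comp x hx
    rw [satB]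
    split_ifs with h
    · exact hx
    · exact ih _ x ((mem_growB R C grid comp x).mpr (Or.inl hx))

theorem satB_sound (R C : Int) (grid : List String) (s : Int × Int) :
    ∀ (fuel : Nat) (comp : PySem.Set (Int × Int)),
      (∀ x ∈ comp, Reach R C grid s x) →
      ∀ x ∈ satB R C grid fuel comp, Reach R C grid s x := by
  intro fuel
  induction fuel with
  | zero => intro comp h x hx; exact h x (by simpa [satB] using hx)
  | succ n ih =>
    intro comp h x hx
    rw [satB] at hx
    split_ifs at hx with heq
    · exact h x hx
    · refine ih _ ?_ x hx
      intro y hy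
      rcases (mem_growB R C grid comp y).mp hy with hy' | ⟨p, hp, hadj, hw⟩
      · exact h y hy'
      · exact (h p hp).tail ⟨hadj, hw⟩

theorem nodup_box_card (R C : Int) (l : List (Int × Int)) (hnd : l.Nodup)
    (hbox : ∀ x ∈ l, inB R C x) : l.length ≤ R.toNat * C.toNat := by
  have hsub : l ⊆ (PySem.List.pyRange 0 R 1).flatMap
      (fun r => (PySem.List.pyRange 0 C 1).map (fun c => (r, c))) := by
    intro x hx
    obtain ⟨h1, h2, h3, h4⟩ := hbox x hx
    simp only [List.mem_flatMap, List.mem_map]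
    exact ⟨x.1, by rw [PySem.List.mem_pyRange_one]; omega,
      x.2, by rw [PySem.List.mem_pyRange_one]; omega, rfl⟩
  have := List.Subperm.length_le (List.subperm_of_subset hnd hsub)
  calc l.length ≤ _ := this
    _ = R.toNat * C.toNat := by
      rw [List.length_flatMap]
      simp [PySem.List.length_pyRange_one]

theorem satB_grow_len (R C : Int) (grid : List String) (comp : PySem.Set (Int × Int))
    (hnd : comp.Nodup) (hne : ¬ PySem.Set.equal (growB R C grid comp) comp = true) :
    comp.length + 1 ≤ (growB R C grid comp).length := by
  have hsub : comp ⊆ growB R C grid comp :=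
    fun x hx => (mem_growB R C grid comp x).mpr (Or.inl hx)
  have hsp := List.subperm_of_subset hnd hsub
  have hle := List.Subperm.length_le hsp
  rcases Nat.lt_or_ge comp.length (growB R C grid comp).length with h | h
  · omega
  · exfalso
    apply hne
    rw [PySem.Set.equal_iff]
    intro x
    have hperm := List.Subperm.perm_of_length_le hsp h
    exact ⟨fun hx => hperm.symm.subset hx, fun hx => hsub hx⟩

theorem satB_closed (R C : Int) (grid : List String) :
    ∀ (fuel : Nat) (comp : PySem.Set (Int × Int)), comp.Nodup →
      (∀ x ∈ comp, inB R C x) →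
      R.toNat * C.toNat + 1 ≤ comp.length + fuel →
      ∀ p ∈ satB R C grid fuel comp, ∀ q ∈ nbrs p.1 p.2, whP R C grid q →
        q ∈ satB R C grid fuel comp := by
  intro fuel
  induction fuel with
  | zero =>
    intro comp hnd hbox hfuel
    exfalso
    have := nodup_box_card R C comp hnd hbox
    omega
  | succ n ih =>
    intro comp hnd hbox hfuel p hp q hq hw
    rw [satB] at hp ⊢
    split_ifs at hp ⊢ with heq
    · have : q ∈ growB R C grid comp :=
        (mem_growB R C grid comp q).mpr (Or.inr ⟨p, hp, hq, hw⟩)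
      exact (PySem.Set.equal_iff _ _ |>.mp heq q).mp this
    · refine ih (growB R C grid comp) (nodup_growB R C grid comp hnd) ?_ ?_ p hp q hq hw
      · intro x hx
        rcases (mem_growB R C grid comp x).mp hx with h | ⟨_, _, _, hw'⟩
        · exact hbox x h
        · exact hw'.1
      · have := satB_grow_len R C grid comp hnd heq
        omega

-- the component B computes is exactly the reach set of its start
theorem mem_satB_start (R C : Int) (grid : List String) (s : Int × Int) (hbox : inB R C s)
    (x : Int × Int) :
    x ∈ satB R C grid (R.toNat * C.toNat + 1) [s] ↔ Reach R C grid s x := by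
  constructor
  · intro hx
    refine satB_sound R C grid s _ [s] ?_ x hx
    intro y hy
    rcases List.mem_singleton.mp hy with rfl
    exact Relation.ReflTransGen.refl
  · intro hr
    induction hr with
    | refl => exact satB_mono R C grid _ [s] s (List.mem_singleton_self s)
    | @tail m p hm hrel ih =>
      exact satB_closed R C grid _ [s] (List.nodup_singleton s)
        (by intro y hy; rcases List.mem_singleton.mp hy with rfl; exact hbox)
        (by simp) m ih p hrel.1 hrel.2

-- ---- outer loop: relate A's (vis, scores) with B's (seen, found) ----

theorem mem_borderB (R C : Int) (grid : List String) (comp : PySem.Set (Int × Int))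
    (e : Int × Int) :
    e ∈ borderB R C grid comp ↔ dotP R C grid e ∧ ∃ p ∈ comp, e ∈ nbrs p.1 p.2 := by
  unfold borderB
  rw [PySem.Set.mem_ofList]
  simp only [List.mem_flatMap, List.mem_filter, Bool.and_eq_true, decide_eq_true_eq, beq_iff_eq]
  constructor
  · rintro ⟨p, hp, hadj, ⟨⟨⟨⟨h1, h2⟩, h3⟩, h4⟩, h5⟩⟩
    exact ⟨⟨⟨h1, h2, h3, h4⟩, h5⟩, p, hp, hadj⟩
  · rintro ⟨⟨⟨h1, h2, h3, h4⟩, h5⟩, p, hp, hadj⟩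
    exact ⟨p, hp, hadj, ⟨⟨⟨⟨h1, h2⟩, h3⟩, h4⟩, h5⟩⟩

theorem dict_size_ne_zero_of_insert {κ ν : Type} [BEq κ] [LawfulBEq κ]
    (d : PySem.Dict κ ν) (k : κ) (v : ν) : (d.insert k v).size ≠ 0 := by
  rw [PySem.Dict.size_insert]
  split_ifs with h
  · have hk : k ∈ d.keys := (PySem.Dict.contains_iff_mem_keys d k).mp h
    have : d.keys.length ≠ 0 := by
      intro h0
      rw [List.length_eq_zero_iff] at h0
      simp [h0] at hk
    have hkeys : d.keys.length = d.size := by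
      simp [PySem.Dict.keys, PySem.Dict.size]
    omega
  · omega

theorem foldl_rel {α β γ : Type} (f : α → γ → α) (g : β → γ → β) (P : α → β → Prop)
    (L : List γ) (hstep : ∀ a b x, x ∈ L → P a b → P (f a x) (g b x)) :
    ∀ a b, P a b → P (L.foldl f a) (L.foldl g b) := by
  induction L with
  | nil => intro a b h; exact h
  | cons x t ih =>
    intro a b h
    exact ih (fun a b y hy => hstep a b y (List.mem_cons_of_mem _ hy)) _ _
      (hstep a b x List.mem_cons_self h)

def OutInv (R C : Int) (grid : List String)
    (a : List (List Int) × PySem.Dict (Int × Int) Int) (b : PySem.Set (Int × Int) × Bool) : Prop :=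
  dimsV R C a.1 ∧
  (∀ p, VisP R C a.1 p ↔ p ∈ b.1) ∧
  List.Nodup b.1 ∧
  (∀ p, VisP R C a.1 p → whP R C grid p) ∧
  (∀ p, VisP R C a.1 p → ∀ q ∈ nbrs p.1 p.2, whP R C grid q → VisP R C a.1 q) ∧
  (a.2.size ≠ 0 ↔ b.2 = true)

theorem out_cell (R C : Int) (grid : List String)
    (a : List (List Int) × PySem.Dict (Int × Int) Int) (b : PySem.Set (Int × Int) × Bool)
    (r c : Int) (hr : 0 ≤ r ∧ r < R) (hc : 0 ≤ c ∧ c < C) (h : OutInv R C grid a b) :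
    OutInv R C grid
      (if visGet a.1 r c ≠ 0 ∨ ¬(gridAt grid r c = some 'W') then a
       else if PySem.Set.len (loopA R C grid (visMark a.1 r c) [(r, c)] PySem.Set.empty 0).2.1 = 1 then
           ((loopA R C grid (visMark a.1 r c) [(r, c)] PySem.Set.empty 0).1,
            a.2.insert ((loopA R C grid (visMark a.1 r c) [(r, c)] PySem.Set.empty 0).2.1.headD (0, 0))
              (a.2.getD ((loopA R C grid (visMark a.1 r c) [(r, c)] PySem.Set.empty 0).2.1.headD (0, 0)) 0 +
                (loopA R C grid (visMark a.1 r c) [(r, c)] PySem.Set.empty 0).2.2))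
         else ((loopA R C grid (visMark a.1 r c) [(r, c)] PySem.Set.empty 0).1, a.2))
      (if ¬(gridAt grid r c = some 'W') ∨ PySem.Set.contains b.1 (r, c) then b
       else
         (PySem.Set.union b.1 (satB R C grid (R.toNat * C.toNat + 1) (PySem.Set.add PySem.Set.empty (r, c))),
          b.2 || (PySem.Set.len (borderB R C grid
            (satB R C grid (R.toNat * C.toNat + 1) (PySem.Set.add PySem.Set.empty (r, c)))) == 1))) := by
  obtain ⟨h1, h2, h3, h4, h5, h6⟩ := h
  have hinB : inB R C (r, c) := ⟨hr.1, hr.2, hc.1, hc.2⟩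
  have hvis_iff : (visGet a.1 r c ≠ 0) ↔ (r, c) ∈ b.1 := by
    constructor
    · intro hv; exact (h2 (r, c)).mp ⟨hinB, hv⟩
    · intro hm; exact ((h2 (r, c)).mpr hm).2
  by_cases hskipA : visGet a.1 r c ≠ 0 ∨ ¬(gridAt grid r c = some 'W')
  · have hskipB : ¬(gridAt grid r c = some 'W') ∨ PySem.Set.contains b.1 (r, c) := by
      rcases hskipA with hv | hw
      · exact Or.inr ((PySem.Set.contains_iff b.1 (r, c)).mpr (hvis_iff.mp hv))
      · exact Or.inl hw
    rw [if_pos hskipA, if_pos hskipB]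
    exact ⟨h1, h2, h3, h4, h5, h6⟩
  · have hW : gridAt grid r c = some 'W' := by
      rcases not_or.mp hskipA with ⟨-, hw⟩; exact not_not.mp hw
    have hv0 : visGet a.1 r c = 0 := by
      rcases not_or.mp hskipA with ⟨hv, -⟩; exact not_not.mp hv
    have hskipB : ¬(¬(gridAt grid r c = some 'W') ∨ PySem.Set.contains b.1 (r, c)) := by
      rintro (hw | hm)
      · exact hw hW
      · exact absurd (hvis_iff.mpr ((PySem.Set.contains_iff b.1 (r, c)).mp hm)) (not_not_intro hv0)
    rw [if_neg hskipA, if_neg hskipB]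
    -- both sides flood the component of s = (r, c)
    have hwS : whP R C grid (r, c) := by
      refine ⟨hinB, ?_, ?_⟩ <;> rw [hW] <;> intro hcon <;> simp at hcon
    have hnvS : ¬ VisP R C a.1 (r, c) := fun hv => hv.2 hv0
    have hmark : ∀ p, VisP R C (visMark a.1 r c) p ↔ VisP R C a.1 p ∨ p = (r, c) :=
      VisP_mark_iff R C a.1 r c h1 hinB
    have hInv0 : InvA R C grid (fun p => VisP R C a.1 p) (r, c)
        (visMark a.1 r c) [(r, c)] PySem.Set.empty := by
      refine ⟨dims_mark R C a.1 r c h1, ?_, ?_, ?_, ?_, ?_, ?_, List.nodup_nil, ?_⟩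
      · intro p hp
        rcases List.mem_singleton.mp hp with rfl
        exact ⟨(hmark _).mpr (Or.inr rfl), Relation.ReflTransGen.refl, hnvS⟩
      · intro p hp
        exact (hmark p).mpr (Or.inl hp)
      · intro p hp
        rcases (hmark p).mp hp with hv | rfl
        · exact h4 p hv
        · exact hwS
      · intro p hp hnst q hq hw
        have hpne : p ≠ (r, c) := fun he => hnst (he ▸ List.mem_singleton_self _)
        rcases (hmark p).mp hp with hv | rfl
        · exact (hmark q).mpr (Or.inl (h5 p hv q hq hw))
        · exact absurd rfl hpne
      · intro e he; exact absurd he (List.not_mem_nil)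
      · intro e hd p hp hU hnst hadj
        rcases (hmark p).mp hp with hv | rfl
        · exact absurd hv hU
        · exact absurd (List.mem_singleton_self _) hnst
      · intro p hp
        rcases (hmark p).mp hp with hv | rfl
        · exact Or.inl hv
        · exact Or.inr Relation.ReflTransGen.refl
    obtain ⟨m1, m2, m3, m4, m5, m6, m7, m8⟩ :=
      loopA_master R C grid (fun p => VisP R C a.1 p) (r, c)
        (visMark a.1 r c) [(r, c)] PySem.Set.empty 0 hInv0
    have hdisj : ∀ p, Reach R C grid (r, c) p → ¬ VisP R C a.1 p :=
      reach_disjoint R C grid (fun p => VisP R C a.1 p) h5 (r, c) hwS hnvS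
    have hVisOut : ∀ p, VisP R C (loopA R C grid (visMark a.1 r c) [(r, c)] PySem.Set.empty 0).1 p
        ↔ VisP R C a.1 p ∨ Reach R C grid (r, c) p := by
      intro p
      constructor
      · exact m3 p
      · rintro (hv | hrch)
        · exact m4 p hv
        · induction hrch with
          | refl => exact m2 (r, c) ((hmark _).mpr (Or.inr rfl))
          | @tail m p hm hrel ih => exact m5 m ih p hrel.1 hrel.2
    have hadd : PySem.Set.add (PySem.Set.empty : PySem.Set (Int × Int)) (r, c) = [(r, c)] := by
      rw [show (PySem.Set.empty : PySem.Set (Int × Int)) = [] from rfl,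
        PySem.Set.add_of_not_mem List.not_mem_nil]
      rfl
    have hcomp : ∀ x, x ∈ satB R C grid (R.toNat * C.toNat + 1)
        (PySem.Set.add PySem.Set.empty (r, c)) ↔ Reach R C grid (r, c) x := by
      intro x
      rw [hadd]
      exact mem_satB_start R C grid (r, c) hinB x
    have hborder : ∀ e, e ∈ (loopA R C grid (visMark a.1 r c) [(r, c)] PySem.Set.empty 0).2.1 ↔
        e ∈ borderB R C grid (satB R C grid (R.toNat * C.toNat + 1)
          (PySem.Set.add PySem.Set.empty (r, c))) := by
      intro e
      rw [mem_borderB]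
      constructor
      · intro he
        obtain ⟨hd, p, hp, hU, hadj⟩ := m6 e he
        have hrch : Reach R C grid (r, c) p := by
          rcases (hVisOut p).mp hp with hv | hrch
          · exact absurd hv hU
          · exact hrch
        exact ⟨hd, p, (hcomp p).mpr hrch, hadj⟩
      · rintro ⟨hd, p, hp, hadj⟩
        have hrch := (hcomp p).mp hp
        exact m7 e hd p ((hVisOut p).mpr (Or.inr hrch)) (hdisj p hrch) hadj
    have hblen : PySem.Set.len (loopA R C grid (visMark a.1 r c) [(r, c)] PySem.Set.empty 0).2.1 =
        PySem.Set.len (borderB R C grid (satB R C grid (R.toNat * C.toNat + 1)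
          (PySem.Set.add PySem.Set.empty (r, c)))) := by
      have hperm := (List.perm_ext_iff_of_nodup m8 (PySem.Set.nodup_ofList _)).mpr hborder
      simp only [PySem.Set.len]
      exact congrArg Int.ofNat hperm.length_eq
    -- the new invariant, shared by both branches of A's score update
    have hseen : ∀ p, VisP R C (loopA R C grid (visMark a.1 r c) [(r, c)] PySem.Set.empty 0).1 p ↔
        p ∈ PySem.Set.union b.1 (satB R C grid (R.toNat * C.toNat + 1)
          (PySem.Set.add PySem.Set.empty (r, c))) := by
      intro p
      rw [PySem.Set.mem_union, hVisOut p, h2 p, hcomp p]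
    have hwh' : ∀ p, VisP R C (loopA R C grid (visMark a.1 r c) [(r, c)] PySem.Set.empty 0).1 p →
        whP R C grid p := by
      intro p hp
      rcases (hVisOut p).mp hp with hv | hrch
      · exact h4 p hv
      · rcases reach_wh R C grid (r, c) p hrch with rfl | hw
        · exact hwS
        · exact hw
    have hnodup' : List.Nodup (PySem.Set.union b.1 (satB R C grid (R.toNat * C.toNat + 1)
        (PySem.Set.add PySem.Set.empty (r, c)))) := PySem.Set.nodup_union _ _ h3
    by_cases hlen : PySem.Set.len (loopA R C grid (visMark a.1 r c) [(r, c)] PySem.Set.empty 0).2.1 = 1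
    · rw [if_pos hlen]
      have hlenB : (PySem.Set.len (borderB R C grid (satB R C grid (R.toNat * C.toNat + 1)
          (PySem.Set.add PySem.Set.empty (r, c)))) == 1) = true := by
        rw [beq_iff_eq, ← hblen]
        exact hlen
      refine ⟨m1, hseen, hnodup', hwh', m5, ?_⟩
      constructor
      · intro _
        show (b.2 || _) = true
        rw [hlenB, Bool.or_true]
      · intro _; exact dict_size_ne_zero_of_insert a.2 _ _
    · rw [if_neg hlen]
      have hlenB : (PySem.Set.len (borderB R C grid (satB R C grid (R.toNat * C.toNat + 1)
          (PySem.Set.add PySem.Set.empty (r, c)))) == 1) = false := by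
        rw [beq_eq_false_iff_ne, ← hblen]
        exact hlen
      refine ⟨m1, hseen, hnodup', hwh', m5, ?_⟩
      show a.2.size ≠ 0 ↔ (b.2 || _) = true
      rw [hlenB, Bool.or_false]
      exact h6

theorem OutInv_init (R C : Int) (grid : List String) :
    OutInv R C grid ((PySem.List.pyRange 0 R 1).map (fun _ => List.replicate C.toNat (0 : Int)),
      (PySem.Dict.empty : PySem.Dict (Int × Int) Int))
      ((PySem.Set.empty : PySem.Set (Int × Int)), false) := by
  have hvg : ∀ p : Int × Int, inB R C p →
      visGet ((PySem.List.pyRange 0 R 1).map (fun _ => List.replicate C.toNat (0 : Int))) p.1 p.2 = 0 := by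
    intro p hp
    obtain ⟨p1, p2, p3, p4⟩ := hp
    rw [visGet_eq]
    have hr : p.1.toNat < ((PySem.List.pyRange 0 R 1).map
        (fun _ => List.replicate C.toNat (0 : Int))).length := by
      rw [List.length_map, PySem.List.length_pyRange_one]
      omega
    rw [List.getElem?_eq_getElem hr]
    simp only [List.getElem_map, Option.getD_some]
    have hcn : p.2.toNat < C.toNat := by omega
    rw [List.getElem?_eq_getElem (by simpa using hcn)]
    simp
  refine ⟨?_, ?_, List.nodup_nil, ?_, ?_, ?_⟩
  · constructor
    · rw [List.length_map, PySem.List.length_pyRange_one]; omega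
    · intro row hrow
      rcases List.mem_map.mp hrow with ⟨_, _, rfl⟩
      simp
  · intro p
    constructor
    · rintro ⟨hin, hv⟩; exact absurd (hvg p hin) hv
    · intro hm; exact absurd hm (List.not_mem_nil)
  · rintro p ⟨hin, hv⟩; exact absurd (hvg p hin) hv
  · rintro p ⟨hin, hv⟩; exact absurd (hvg p hin) hv
  · simp [PySem.Dict.size_empty]

theorem solve_eq_alt (R C : Int) (grid : List String) : solve R C grid = solve_alt R C grid := by
  simp only [solve, solve_alt]
  have hfin := foldl_rel _ _ (OutInv R C grid) (PySem.List.pyRange 0 R 1)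
    (fun a b r hrmem hab =>
      foldl_rel _ _ (OutInv R C grid) (PySem.List.pyRange 0 C 1)
        (fun a b c hcmem hab =>
          out_cell R C grid a b r c
            (by rcases PySem.List.mem_pyRange_one.mp hrmem with ⟨h1, h2⟩; omega)
            (by rcases PySem.List.mem_pyRange_one.mp hcmem with ⟨h1, h2⟩; omega) hab)
        a b hab)
    _ _ (OutInv_init R C grid)
  obtain ⟨-, -, -, -, -, h6⟩ := hfin
  split_ifs with ha hb hb
  · rfl
  · exact absurd (h6.mp ha) (by simpa using hb)
  · exact absurd (h6.mpr (by simpa using hb)) ha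
  · rfl

-- ===== VERDICT (by name: the statement is the Claim_ definition above) =====
theorem solve_spec : Claim_equal_solve := by
  intro R C grid _ _
  unfold Spec_solve
  exact solve_eq_alt R C grid
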